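-- pv_equiv track=rewrite | github.com/danielk0k/AdventofCode2021 | Day10/SyntaxScoring.py | sumScore_v1
-- ===== SOURCE A (Python) =====
-- def sumScore_v1(lst):
--     score = 0
--     for char in lst:
--         if (char == ")"):
--             score += 3
--         elif (char == "]"):
--             score += 57
--         elif (char == "}"):
--             score += 1197
--         elif (char == ">"):
--             score += 25137
--         else:
--             pass
--     return score
-- ===== SOURCE B (Python) =====
-- def sumScore_v1(lst):
--     # Staged passes: one independent counting pass per bracket symbol,
--     # then a constant-size closed-form combination of the four counts.
--     return (3 * lst.count(")")
--             + 57 * lst.count("]")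
--             + 1197 * lst.count("}")
--             + 25137 * lst.count(">"))
-- ===== Notes on version B (the rewrite author's own statement) =====
-- stated objective: alternative
-- what changed: B replaces A's single branch-and-accumulate loop by four independent staged counting passes (list.count per closing bracket) combined in one closed-form linear expression 3*c1+57*c2+1197*c3+25137*c4; no running accumulator or per-element branching remains.
import Mathlib
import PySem

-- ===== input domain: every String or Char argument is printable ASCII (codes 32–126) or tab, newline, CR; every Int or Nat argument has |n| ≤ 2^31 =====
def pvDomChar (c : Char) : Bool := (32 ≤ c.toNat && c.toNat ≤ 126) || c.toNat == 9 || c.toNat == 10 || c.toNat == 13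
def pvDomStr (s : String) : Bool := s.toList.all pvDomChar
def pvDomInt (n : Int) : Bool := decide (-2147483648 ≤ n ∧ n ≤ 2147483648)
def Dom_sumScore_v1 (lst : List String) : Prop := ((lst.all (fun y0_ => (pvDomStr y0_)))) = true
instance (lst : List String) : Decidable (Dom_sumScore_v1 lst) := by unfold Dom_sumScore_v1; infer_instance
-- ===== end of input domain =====

-- B replaces A's branch-and-accumulate loop by four independent counting passes combined in one closed-form expression (alternative decomposition, same cost).

-- ===== PORT A =====
def sumScore_v1 (lst : List String) : Int :=
  lst.foldl (fun score char =>
    if char == ")" then score + 3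
    else if char == "]" then score + 57
    else if char == "}" then score + 1197
    else if char == ">" then score + 25137
    else score) 0

-- ===== PORT B =====
def sumScore_v1_alt (lst : List String) : Int :=
  3 * (PySem.List.count lst ")" : Int)
    + 57 * (PySem.List.count lst "]" : Int)
    + 1197 * (PySem.List.count lst "}" : Int)
    + 25137 * (PySem.List.count lst ">" : Int)

-- ===== PRECONDITION & SPEC =====
def Spec_sumScore_v1 (lst : List String) (out : Int) : Prop := out = sumScore_v1_alt lst
instance (lst : List String) (out : Int) : Decidable (Spec_sumScore_v1 lst out) := by unfold Spec_sumScore_v1; infer_instance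

-- ===== CLAIM (what is proved, stated in full; the proofs are below) =====
def Claim_equal_sumScore_v1 : Prop := ∀ (lst : List String), Dom_sumScore_v1 lst → Spec_sumScore_v1 lst (sumScore_v1 lst)

-- ===== LEMMAS AND PROOFS =====
theorem sumScore_v1_foldl_counts (lst : List String) (a : Int) :
    lst.foldl (fun score char =>
      if char == ")" then score + 3
      else if char == "]" then score + 57
      else if char == "}" then score + 1197
      else if char == ">" then score + 25137
      else score) a
    = a + 3 * (lst.count ")" : Int) + 57 * (lst.count "]" : Int)
        + 1197 * (lst.count "}" : Int) + 25137 * (lst.count ">" : Int) := by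
  induction lst generalizing a with
  | nil => simp
  | cons x xs ih =>
    simp only [List.foldl_cons, List.count_cons, ih]
    by_cases h1 : x = ")" <;> by_cases h2 : x = "]" <;> by_cases h3 : x = "}" <;>
      by_cases h4 : x = ">" <;> simp_all <;> ring

-- ===== VERDICT (by name: the statement is the Claim_ definition above) =====
theorem sumScore_v1_spec : Claim_equal_sumScore_v1 := by
  intro lst _
  show sumScore_v1 lst = sumScore_v1_alt lst
  unfold sumScore_v1 sumScore_v1_alt
  rw [sumScore_v1_foldl_counts]
  simp [PySem.List.count_eq]
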